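-- pv_equiv track=rewrite | github.com/prajwalun/Graph-3 | optimize.py | minCostToSupplyWater
-- ===== SOURCE A (Python) =====
-- from typing import List
--
-- def minCostToSupplyWater(n: int, wells: List[int], pipes: List[List[int]]) -> int:
--     n += 1
--     parents = [-1] * n
--
--     def find(a):
--         if parents[a] == -1:
--             return a
--         else:
--             parents[a] = find(parents[a])
--             return parents[a]
--
--     def union(a, b, cost):
--         parentA = find(a)
--         parentB = find(b)
--
--         if parentA != parentB:
--             parents[parentB] = parentA
--             return cost
--
--         return 0
--
--     edgesList = [(wells[i - 1], 0, i) for i in range(1, n)]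
--
--     for cityOne, cityTwo, cost in pipes:
--         edgesList.append((cost, cityOne, cityTwo))
--
--     edgesList.sort()
--
--     totalCost = 0
--     for cost, cityOne, cityTwo in edgesList:
--         totalCost += union(cityOne, cityTwo, cost)
--
--     return totalCost
-- ===== SOURCE B (Python) =====
-- def minCostToSupplyWater(n, wells, pipes):
--     edges = sorted([(w, 0, i + 1) for i, w in enumerate(wells[:n])] +
--                    [(c, a, b) for a, b, c in pipes])
--     comp = list(range(n + 1))
--     total = 0
--     for cost, a, b in edges:
--         ca, cb = comp[a], comp[b]
--         if ca != cb:
--             total += cost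
--             comp = [ca if x == cb else x for x in comp]
--     return total
-- ===== Notes on version B (the rewrite author's own statement) =====
-- stated objective: simpler
-- what changed: Kruskal's recursive path-compressing union-find (nested find/union closures mutating a parent forest) is replaced by a flat component-label array: each sorted edge joining two differently-labelled endpoints adds its cost and relabels one component, so B has no nested functions and no recursion.
-- outside the precondition, e.g. on minCostToSupplyWater(1, [5], [[-1, 1, 3]]): A returns 8, B returns 5; on minCostToSupplyWater(-1, [7, 7], []): A returns 0, B raises IndexError
import Mathlib
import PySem

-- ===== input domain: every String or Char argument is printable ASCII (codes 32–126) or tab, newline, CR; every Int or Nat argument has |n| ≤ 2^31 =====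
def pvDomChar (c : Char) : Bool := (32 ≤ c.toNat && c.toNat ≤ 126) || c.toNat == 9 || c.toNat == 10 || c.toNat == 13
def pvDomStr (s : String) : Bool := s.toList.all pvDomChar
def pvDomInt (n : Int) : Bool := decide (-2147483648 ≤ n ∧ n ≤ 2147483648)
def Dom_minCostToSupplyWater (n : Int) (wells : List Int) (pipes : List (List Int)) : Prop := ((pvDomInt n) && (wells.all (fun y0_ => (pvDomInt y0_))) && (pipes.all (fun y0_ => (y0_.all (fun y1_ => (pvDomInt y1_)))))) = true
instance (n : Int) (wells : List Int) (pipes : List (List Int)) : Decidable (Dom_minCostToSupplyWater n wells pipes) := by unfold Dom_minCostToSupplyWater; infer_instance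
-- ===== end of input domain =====

-- B replaces A's recursive path-compressing union-find with a flat component-label
-- array relabelled on each merge: shorter and plainer, no nested recursion (objective: simpler).

-- ===== PORT A =====
-- Python sorts edge triples lexicographically; this injective key realises that
-- order exactly for |components| ≤ 2^31 (the Dom bound).
def pvKeyA (t : Int × Int × Int) : Int :=
  (t.1 * 8589934592 + t.2.1) * 8589934592 + t.2.2

-- find(a) with path compression; fuel (length+1) only makes the recursion total,
-- it is never exhausted on inputs satisfying Pre_ (chains are shorter than the list).
def pvFindA : Nat → List Int → Int → List Int × Int
  | 0, ps, a => (ps, a)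
  | fuel + 1, ps, a =>
    match PySem.List.pyGet? ps a with
    | none => (ps, a)          -- IndexError in Python; unreachable under Pre_
    | some p =>
      if p = -1 then (ps, a)
      else
        let r := pvFindA fuel ps p
        (PySem.List.pySetD r.1 a r.2, r.2)

def pvUnionA (ps : List Int) (a b cost : Int) : List Int × Int :=
  let fa := pvFindA (ps.length + 1) ps a
  let fb := pvFindA (fa.1.length + 1) fa.1 b
  if fa.2 ≠ fb.2 then (PySem.List.pySetD fb.1 fb.2 fa.2, cost)
  else (fb.1, 0)

def pvStepA (st : List Int × Int) (e : Int × Int × Int) : List Int × Int :=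
  let u := pvUnionA st.1 e.2.1 e.2.2 e.1
  (u.1, st.2 + u.2)

def minCostToSupplyWater (n : Int) (wells : List Int) (pipes : List (List Int)) : Int :=
  let m := n + 1
  let parents := List.replicate m.toNat (-1 : Int)
  -- wells[i-1]: pyGetD is the total form; out-of-range raises in Python, excluded by Pre_
  let edges0 := (PySem.List.pyRange 1 m 1).map
    (fun i => (PySem.List.pyGetD wells (i - 1) 0, (0 : Int), i))
  let edges1 := pipes.foldl (fun acc p =>
    match p with
    | [c1, c2, c] => acc ++ [(c, c1, c2)]
    | _ => acc) edges0        -- rows of length ≠ 3 raise in Python; unreachable under Pre_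
  ((PySem.List.sorted edges1 pvKeyA false).foldl pvStepA (parents, 0)).2

-- ===== PORT B =====

def pvStepB (st : List Int × Int) (e : Int × Int × Int) : List Int × Int :=
  let ca := PySem.List.pyGetD st.1 e.2.1 0
  let cb := PySem.List.pyGetD st.1 e.2.2 0
  if ca ≠ cb then (st.1.map (fun x => if x = cb then ca else x), st.2 + e.1)
  else st

def minCostToSupplyWater_alt (n : Int) (wells : List Int) (pipes : List (List Int)) : Int :=
  let wellEdges := (PySem.List.enumerate (PySem.List.slice wells none (some n)) 0).map
    (fun p => (p.2, (0 : Int), p.1 + 1))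
  -- '(c, a, b) for a, b, c in pipes': unpacking, exact for the length-3 rows Pre_ admits
  let pipeEdges := pipes.map (fun p => (p.getD 2 0, p.getD 0 0, p.getD 1 0))
  -- Python's lexicographic tuple sort; the key is exact for |components| ≤ 2^31 (Dom)
  ((PySem.List.sorted (wellEdges ++ pipeEdges)
    (fun t => (t.1 * 8589934592 + t.2.1) * 8589934592 + t.2.2) false).foldl pvStepB
    (PySem.List.pyRange 0 (n + 1) 1, 0)).2

-- ===== PRECONDITION & SPEC =====
-- Pre_ is the natural domain of the task — n ≥ 0 cities, a well cost for each city,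
-- pipes given as [cityOne, cityTwo, cost] rows with city indices in 0..n — plus the
-- degenerate corner (n < 0 with no pipes and no usable wells) where both programs see no
-- edges and return 0.  Outside it A raises (IndexError/ValueError/RecursionError) except
-- for pipe rows with negative city indices, where Python's negative-index wraparound
-- makes A's result accidental (see claim cites).
def Pre_minCostToSupplyWater (n : Int) (wells : List Int) (pipes : List (List Int)) : Prop :=
  (0 ≤ n ∧ n ≤ (wells.length : Int) ∧
    ∀ p ∈ pipes, p.length = 3 ∧
      0 ≤ p.getD 0 0 ∧ p.getD 0 0 ≤ n ∧ 0 ≤ p.getD 1 0 ∧ p.getD 1 0 ≤ n) ∨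
  (n < 0 ∧ pipes = [] ∧ (wells.length : Int) ≤ -n)

instance (n : Int) (wells : List Int) (pipes : List (List Int)) :
    Decidable (Pre_minCostToSupplyWater n wells pipes) := by
  unfold Pre_minCostToSupplyWater; infer_instance

def pvWitness_minCostToSupplyWater : Int × List Int × List (List Int) :=
  (2, [1, 2], [[1, 2, 3]])

def Spec_minCostToSupplyWater (n : Int) (wells : List Int) (pipes : List (List Int)) (out : Int) : Prop := out = minCostToSupplyWater_alt n wells pipes
instance (n : Int) (wells : List Int) (pipes : List (List Int)) (out : Int) : Decidable (Spec_minCostToSupplyWater n wells pipes out) := by unfold Spec_minCostToSupplyWater; infer_instance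

-- ===== CLAIM (what is proved, stated in full; the proofs are below) =====
def Claim_equal_minCostToSupplyWater : Prop := ∀ (n : Int) (wells : List Int) (pipes : List (List Int)), Dom_minCostToSupplyWater n wells pipes → Pre_minCostToSupplyWater n wells pipes → Spec_minCostToSupplyWater n wells pipes (minCostToSupplyWater n wells pipes)

-- ===== LEMMAS AND PROOFS =====

-- The coupling invariant: `comp` stores, for every index, the root that A's union-find
-- forest `ps` assigns to it; `d` is a per-node depth certificate bounding chain length
-- by the size of the node's component.
def pvInvD (d : Nat → Nat) (ps comp : List Int) : Prop :=
  ps.length = comp.length ∧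
  ∀ i, i < ps.length →
    (ps.getD i 0 = -1 → comp.getD i 0 = (i : Int)) ∧
    (ps.getD i 0 ≠ -1 → 0 ≤ ps.getD i 0 ∧ (ps.getD i 0).toNat < ps.length ∧
       d (ps.getD i 0).toNat < d i ∧ comp.getD (ps.getD i 0).toNat 0 = comp.getD i 0) ∧
    0 ≤ comp.getD i 0 ∧ (comp.getD i 0).toNat < ps.length ∧
    ps.getD (comp.getD i 0).toNat 0 = -1 ∧
    d i < comp.count (comp.getD i 0)

def pvInv (ps comp : List Int) : Prop := ∃ d, pvInvD d ps comp

lemma pvGetD_set (l : List Int) (k : Nat) (v : Int) (j : Nat) (hk : k < l.length) :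
    (l.set k v).getD j 0 = if j = k then v else l.getD j 0 := by
  simp only [List.getD_eq_getElem?_getD, List.getElem?_set]
  rcases eq_or_ne j k with h | h
  · simp [h, hk]
  · simp [h, Ne.symm h]

lemma pvGetD_map_relabel (l : List Int) (f : Int → Int) (i : Nat) (hi : i < l.length) :
    (l.map f).getD i 0 = f (l.getD i 0) := by
  rw [List.getD_eq_getElem _ _ (by simpa using hi), List.getD_eq_getElem _ _ hi, List.getElem_map]

lemma pvCount_relabel_ge (l : List Int) (ca cb y : Int) (hy : y ≠ cb) :
    l.count y ≤ (l.map (fun x => if x = cb then ca else x)).count y := by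
  induction l with
  | nil => simp
  | cons x t ih =>
    simp only [List.map_cons, List.count_cons]
    split_ifs with h1 <;> simp_all <;> omega

lemma pvCount_relabel_ca (l : List Int) (ca cb : Int) (hne : ca ≠ cb) :
    (l.map (fun x => if x = cb then ca else x)).count ca = l.count ca + l.count cb := by
  induction l with
  | nil => simp
  | cons x t ih =>
    simp only [List.map_cons, List.count_cons]
    split_ifs with h1 <;> simp_all [beq_iff_eq] <;> omega

lemma pvFindA_spec (d : Nat → Nat) (ps comp : List Int) (hinv : pvInvD d ps comp) :
    ∀ fuel (a : Int), 0 ≤ a → a.toNat < ps.length → d a.toNat < fuel →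
    (pvFindA fuel ps a).2 = comp.getD a.toNat 0 ∧
    (pvFindA fuel ps a).1.length = ps.length ∧
    pvInvD d (pvFindA fuel ps a).1 comp ∧
    d ((pvFindA fuel ps a).2).toNat ≤ d a.toNat ∧
    (∀ j, (pvFindA fuel ps a).1.getD j 0 = -1 ↔ ps.getD j 0 = -1) := by
  intro fuel
  induction fuel with
  | zero => intro a _ _ hf; omega
  | succ fuel ih =>
    intro a ha0 haL hf
    have hacast : a = ((a.toNat : Nat) : Int) := (Int.toNat_of_nonneg ha0).symm
    have hget : PySem.List.pyGet? ps a = some (ps.getD a.toNat 0) := by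
      conv_lhs => rw [hacast]
      rw [PySem.List.pyGet?_natCast, List.getElem?_eq_getElem haL,
          List.getD_eq_getElem _ _ haL]
    have hA := hinv.2 a.toNat haL
    by_cases hp : ps.getD a.toNat 0 = -1
    · have hres : pvFindA (fuel + 1) ps a = (ps, a) := by
        rw [pvFindA, hget]
        dsimp only
        rw [if_pos hp]
      rw [hres]
      refine ⟨?_, rfl, hinv, ?_, fun j => Iff.rfl⟩
      · rw [hA.1 hp]; exact hacast
      · simp
    · obtain ⟨hp0, hpL, hpd, hpc⟩ := hA.2.1 hp
      have hihp := ih (ps.getD a.toNat 0) hp0 hpL (by omega)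
      set r := pvFindA fuel ps (ps.getD a.toNat 0) with hr
      obtain ⟨hr2, hrlen, hrinv, hrd, hriff⟩ := hihp
      have hres : pvFindA (fuel + 1) ps a = (r.1.set a.toNat r.2, r.2) := by
        rw [pvFindA, hget]
        dsimp only
        rw [if_neg hp, PySem.List.pySetD_of_nonneg _ _ ha0, ← hr]
      have hca0 : 0 ≤ comp.getD a.toNat 0 := hA.2.2.1
      have hcaL : (comp.getD a.toNat 0).toNat < ps.length := hA.2.2.2.1
      have hcaroot : ps.getD (comp.getD a.toNat 0).toNat 0 = -1 := hA.2.2.2.2.1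
      have hr2ca : r.2 = comp.getD a.toNat 0 := by rw [hr2, hpc]
      have hcane : (comp.getD a.toNat 0).toNat ≠ a.toNat := by
        intro hEq
        apply hp
        rw [← hEq]
        exact hcaroot
      have haLr : a.toNat < r.1.length := by omega
      have G : ∀ j, (r.1.set a.toNat r.2).getD j 0
          = if j = a.toNat then r.2 else r.1.getD j 0 :=
        fun j => pvGetD_set r.1 a.toNat r.2 j haLr
      have hLset : (r.1.set a.toNat r.2).length = ps.length := by
        rw [List.length_set, hrlen]
      have hcomp_ca : comp.getD (comp.getD a.toNat 0).toNat 0 = comp.getD a.toNat 0 := by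
        have := (hinv.2 (comp.getD a.toNat 0).toNat hcaL).1 hcaroot
        rw [this, Int.toNat_of_nonneg hca0]
      have hdca : d (comp.getD a.toNat 0).toNat ≤ d (ps.getD a.toNat 0).toNat := by
        rw [← hr2ca]; exact hrd
      rw [hr2ca] at G hLset hres hrd
      rw [hres]
      refine ⟨rfl, hLset, ⟨by rw [hLset, hinv.1], ?_⟩, ?_, ?_⟩
      · intro i hi
        rw [hLset] at hi
        have hIri := hrinv.2 i (by omega)
        by_cases hia : i = a.toNat
        · subst hia
          rw [G, if_pos rfl]
          refine ⟨fun h => absurd h (by omega), fun _ => ?_, ?_, ?_, ?_, ?_⟩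
          · exact ⟨hca0, by rw [hLset]; exact hcaL, by omega, hcomp_ca⟩
          · exact hca0
          · rw [hLset]; exact hcaL
          · rw [G, if_neg hcane]
            exact (hriff _).mpr hcaroot
          · exact hA.2.2.2.2.2
        · rw [G, if_neg hia]
          have hcine : (comp.getD i 0).toNat ≠ a.toNat := by
            intro hEq
            have hroot_i := hIri.2.2.2.2.1
            rw [hEq] at hroot_i
            exact hp ((hriff _).mp hroot_i)
          refine ⟨hIri.1, fun h => ?_, hIri.2.2.1, ?_, ?_, hIri.2.2.2.2.2⟩
          · obtain ⟨q0, qL, qd, qc⟩ := hIri.2.1 h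
            exact ⟨q0, by rw [hLset]; omega, qd, qc⟩
          · rw [hLset]; omega
          · rw [G, if_neg hcine]
            exact hIri.2.2.2.2.1
      · dsimp only; omega
      · intro j
        rw [G]
        by_cases hja : j = a.toNat
        · subst hja
          rw [if_pos rfl]
          constructor
          · intro h; exact absurd h (by omega)
          · intro h; exact absurd h hp
        · rw [if_neg hja]; exact hriff j

lemma pvUnionA_spec (ps comp : List Int) (h : pvInv ps comp) (a b cost : Int)
    (ha0 : 0 ≤ a) (haL : a.toNat < ps.length) (hb0 : 0 ≤ b) (hbL : b.toNat < ps.length) :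
    (pvUnionA ps a b cost).2
        = (if comp.getD a.toNat 0 ≠ comp.getD b.toNat 0 then cost else 0) ∧
    (pvUnionA ps a b cost).1.length = ps.length ∧
    pvInv (pvUnionA ps a b cost).1
      (if comp.getD a.toNat 0 ≠ comp.getD b.toNat 0 then
        comp.map (fun x => if x = comp.getD b.toNat 0 then comp.getD a.toNat 0 else x)
       else comp) := by
  obtain ⟨d, hinv⟩ := h
  have hLc : ps.length = comp.length := hinv.1
  have hcountA := (hinv.2 a.toNat haL).2.2.2.2.2
  have hcountB := (hinv.2 b.toNat hbL).2.2.2.2.2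
  have hfa := pvFindA_spec d ps comp hinv (ps.length + 1) a ha0 haL
    (by have := List.count_le_length (l := comp) (a := comp.getD a.toNat 0); omega)
  set fa := pvFindA (ps.length + 1) ps a with hfadef
  obtain ⟨hfa2, hfalen, hfainv, _, hfaiff⟩ := hfa
  have hfb := pvFindA_spec d fa.1 comp hfainv (fa.1.length + 1) b hb0 (by omega)
    (by have := List.count_le_length (l := comp) (a := comp.getD b.toNat 0); omega)
  set fb := pvFindA (fa.1.length + 1) fa.1 b with hfbdef
  obtain ⟨hfb2, hfblen, hfbinv, _, hfbiff⟩ := hfb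
  have hiff : ∀ j, fb.1.getD j 0 = -1 ↔ ps.getD j 0 = -1 :=
    fun j => (hfbiff j).trans (hfaiff j)
  set ca := comp.getD a.toNat 0 with hcadef
  set cb := comp.getD b.toNat 0 with hcbdef
  have hca0 : 0 ≤ ca := (hinv.2 a.toNat haL).2.2.1
  have hcaL : ca.toNat < ps.length := (hinv.2 a.toNat haL).2.2.2.1
  have hcaroot : ps.getD ca.toNat 0 = -1 := (hinv.2 a.toNat haL).2.2.2.2.1
  have hcb0 : 0 ≤ cb := (hinv.2 b.toNat hbL).2.2.1
  have hcbL : cb.toNat < ps.length := (hinv.2 b.toNat hbL).2.2.2.1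
  have hcbroot : ps.getD cb.toNat 0 = -1 := (hinv.2 b.toNat hbL).2.2.2.2.1
  have hcomp_ca : comp.getD ca.toNat 0 = ca := by
    have := (hinv.2 ca.toNat hcaL).1 hcaroot
    rw [this, Int.toNat_of_nonneg hca0]
  have hcomp_cb : comp.getD cb.toNat 0 = cb := by
    have := (hinv.2 cb.toNat hcbL).1 hcbroot
    rw [this, Int.toNat_of_nonneg hcb0]
  have hdca : d ca.toNat < comp.count ca := by
    have := (hinv.2 ca.toNat hcaL).2.2.2.2.2
    rwa [hcomp_ca] at this
  have hdcb : d cb.toNat < comp.count cb := by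
    have := (hinv.2 cb.toNat hcbL).2.2.2.2.2
    rwa [hcomp_cb] at this
  have hun : pvUnionA ps a b cost
      = if ca ≠ cb then (PySem.List.pySetD fb.1 cb ca, cost) else (fb.1, 0) := by
    rw [pvUnionA]
    rw [← hfadef, ← hfbdef, hfa2, hfb2]
  by_cases hccb : ca = cb
  · rw [hun, if_neg (by simp [hccb]), if_neg (by simp [hccb]), if_neg (by simp [hccb])]
    exact ⟨rfl, by simpa using hfblen.trans hfalen, ⟨d, hfbinv⟩⟩
  · have hccb' : ca ≠ cb := hccb
    have hcane : ca.toNat ≠ cb.toNat := by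
      intro hEq
      apply hccb'
      rw [← Int.toNat_of_nonneg hca0, hEq, Int.toNat_of_nonneg hcb0]
    rw [hun, if_pos hccb', if_pos hccb', if_pos hccb']
    rw [PySem.List.pySetD_of_nonneg _ _ hcb0]
    dsimp only
    have hLps3 : (fb.1.set cb.toNat ca).length = ps.length := by
      rw [List.length_set]; omega
    refine ⟨rfl, hLps3, ?_⟩
    refine ⟨fun i => if comp.getD i 0 = cb then d i + d ca.toNat + 1 else d i, ?_, ?_⟩
    · rw [hLps3, List.length_map, hinv.1]
    · intro i hi
      dsimp only
      rw [hLps3] at hi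
      have hcompL : i < comp.length := by rw [← hinv.1]; omega
      have hIbi := hfbinv.2 i (by omega)
      have G : ∀ j, (fb.1.set cb.toNat ca).getD j 0
          = if j = cb.toNat then ca else fb.1.getD j 0 :=
        fun j => pvGetD_set fb.1 cb.toNat ca j (by omega)
      have C' : ∀ j, j < comp.length →
          (comp.map (fun x => if x = cb then ca else x)).getD j 0
          = if comp.getD j 0 = cb then ca else comp.getD j 0 :=
        fun j hj => pvGetD_map_relabel comp _ j hj
      have hbroot_ca : fb.1.getD ca.toNat 0 = -1 := (hiff _).mpr hcaroot
      have hcount' := pvCount_relabel_ca comp ca cb hccb'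
      rw [G]
      by_cases hicb : i = cb.toNat
      · subst hicb
        rw [if_pos rfl]
        refine ⟨fun hh => absurd hh (by omega), fun _ => ?_, ?_, ?_, ?_, ?_⟩
        · refine ⟨hca0, by omega, ?_, ?_⟩
          · rw [if_neg (by rw [hcomp_ca]; exact hccb'), if_pos hcomp_cb]
            omega
          · rw [C' _ (by omega), C' _ (by omega), if_neg (by rw [hcomp_ca]; exact hccb'),
                hcomp_ca, if_pos hcomp_cb]
        · rw [C' _ (by omega), if_pos hcomp_cb]; exact hca0
        · rw [C' _ (by omega), if_pos hcomp_cb]; omega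
        · rw [C' _ (by omega), if_pos hcomp_cb, G, if_neg hcane]
          exact hbroot_ca
        · rw [C' _ (by omega), if_pos hcomp_cb, if_pos hcomp_cb, hcount']
          omega
      · rw [if_neg hicb]
        by_cases hCicb : comp.getD i 0 = cb
        · have hPi : fb.1.getD i 0 ≠ -1 := by
            intro hh
            have := hIbi.1 hh
            rw [hCicb] at this
            apply hicb
            omega
          refine ⟨fun hh => absurd hh hPi, fun _ => ?_, ?_, ?_, ?_, ?_⟩
          · obtain ⟨q0, qL, qd, qc⟩ := hIbi.2.1 (by exact hPi)
            rw [hCicb] at qc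
            refine ⟨q0, by omega, ?_, ?_⟩
            · rw [if_pos qc, if_pos hCicb]; omega
            · rw [C' _ (by omega), C' _ hcompL, if_pos qc, if_pos hCicb]
          · rw [C' _ hcompL, if_pos hCicb]; exact hca0
          · rw [C' _ hcompL, if_pos hCicb]; omega
          · rw [C' _ hcompL, if_pos hCicb, G, if_neg hcane]
            exact hbroot_ca
          · rw [C' _ hcompL, if_pos hCicb, if_pos hCicb, hcount']
            have : d i < comp.count cb := by
              have := hIbi.2.2.2.2.2
              rwa [hCicb] at this
            omega
        · have hCine : (comp.getD i 0).toNat ≠ cb.toNat := by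
            intro hEq
            apply hCicb
            rw [← Int.toNat_of_nonneg hIbi.2.2.1, hEq, Int.toNat_of_nonneg hcb0]
          refine ⟨fun hh => by rw [C' _ hcompL, if_neg hCicb]; exact hIbi.1 hh,
                  fun hh => ?_, ?_, ?_, ?_, ?_⟩
          · obtain ⟨q0, qL, qd, qc⟩ := hIbi.2.1 hh
            have hqc_ne : comp.getD (fb.1.getD i 0).toNat 0 ≠ cb := by rw [qc]; exact hCicb
            refine ⟨q0, by omega, ?_, ?_⟩
            · rw [if_neg hqc_ne, if_neg hCicb]; omega
            · rw [C' _ (by omega), C' _ hcompL, if_neg hqc_ne, if_neg hCicb, qc]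
          · rw [C' _ hcompL, if_neg hCicb]; exact hIbi.2.2.1
          · rw [C' _ hcompL, if_neg hCicb]; omega
          · rw [C' _ hcompL, if_neg hCicb, G, if_neg hCine]
            exact hIbi.2.2.2.2.1
          · rw [C' _ hcompL, if_neg hCicb, if_neg hCicb]
            have hge := pvCount_relabel_ge comp ca cb (comp.getD i 0) hCicb
            have := hIbi.2.2.2.2.2
            omega

lemma pvFold_spec : ∀ (edges : List (Int × Int × Int)) (ps comp : List Int) (t : Int),
    pvInv ps comp →
    (∀ e ∈ edges, 0 ≤ e.2.1 ∧ e.2.1.toNat < ps.length ∧ 0 ≤ e.2.2 ∧ e.2.2.toNat < ps.length) →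
    (edges.foldl pvStepA (ps, t)).2 = (edges.foldl pvStepB (comp, t)).2 := by
  intro edges
  induction edges with
  | nil => intro ps comp t _ _; rfl
  | cons e rest ih =>
    intro ps comp t hinv hval
    obtain ⟨ha0, haL, hb0, hbL⟩ := hval e (by simp)
    have hlen : ps.length = comp.length := by
      obtain ⟨d, hd⟩ := hinv
      exact hd.1
    have hU := pvUnionA_spec ps comp hinv e.2.1 e.2.2 e.1 ha0 haL hb0 hbL
    obtain ⟨hU2, hUlen, hUinv⟩ := hU
    have hStepA : pvStepA (ps, t) e = ((pvUnionA ps e.2.1 e.2.2 e.1).1,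
        t + (pvUnionA ps e.2.1 e.2.2 e.1).2) := rfl
    have hgetA : PySem.List.pyGetD comp e.2.1 0 = comp.getD e.2.1.toNat 0 := by
      rw [PySem.List.pyGetD_of_nonneg _ _ ha0]
    have hgetB : PySem.List.pyGetD comp e.2.2 0 = comp.getD e.2.2.toNat 0 := by
      rw [PySem.List.pyGetD_of_nonneg _ _ hb0]
    have hStepB : pvStepB (comp, t) e =
        (if comp.getD e.2.1.toNat 0 ≠ comp.getD e.2.2.toNat 0 then
          (comp.map (fun x => if x = comp.getD e.2.2.toNat 0 then comp.getD e.2.1.toNat 0 else x), t + e.1)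
         else (comp, t)) := by
      rw [pvStepB]
      dsimp only
      rw [hgetA, hgetB]
    rw [List.foldl_cons, List.foldl_cons, hStepA, hStepB]
    by_cases hcc : comp.getD e.2.1.toNat 0 ≠ comp.getD e.2.2.toNat 0
    · rw [if_pos hcc]
      rw [if_pos hcc] at hU2 hUinv
      rw [hU2]
      exact ih _ _ _ hUinv (fun e' he' => by
        have := hval e' (by simp [he'])
        omega)
    · rw [if_neg hcc]
      rw [if_neg hcc] at hU2 hUinv
      rw [hU2, add_zero]
      exact ih _ _ _ hUinv (fun e' he' => by
        have := hval e' (by simp [he'])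
        omega)

lemma pvInit_inv (n : Int) :
    pvInv (List.replicate (n + 1).toNat (-1 : Int)) (PySem.List.pyRange 0 (n + 1) 1) := by
  refine ⟨fun _ => 0, ?_, ?_⟩
  · simp [PySem.List.length_pyRange_one]
  · intro i hi
    simp only [List.length_replicate] at hi
    have hlen : (PySem.List.pyRange 0 (n + 1) 1).length = (n + 1).toNat := by
      simp [PySem.List.length_pyRange_one]
    have hC : (PySem.List.pyRange 0 (n + 1) 1).getD i 0 = (i : Int) := by
      rw [List.getD_eq_getElem _ _ (by omega), PySem.List.getElem_pyRange_one]
      simp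
    have hP : ∀ j, j < (n + 1).toNat → (List.replicate (n + 1).toNat (-1 : Int)).getD j 0 = -1 := by
      intro j hj
      rw [List.getD_eq_getElem _ _ (by simpa using hj)]
      simp
    refine ⟨fun _ => by rw [hC], fun h => absurd (hP i hi) h, ?_⟩
    rw [hC]
    refine ⟨by positivity, by simpa using hi, hP _ (by simpa using hi), ?_⟩
    rw [List.count_pos_iff, PySem.List.mem_pyRange_one]
    omega

lemma pvFoldPipes (f : List Int → Int × Int × Int)
    (hf : ∀ a b c : Int, f [a,b,c] = (c,a,b)) :
    ∀ (pipes : List (List Int)) (acc : List (Int × Int × Int)),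
    (∀ p ∈ pipes, p.length = 3) →
    pipes.foldl (fun acc p =>
      match p with
      | [c1, c2, c] => acc ++ [(c, c1, c2)]
      | _ => acc) acc = acc ++ pipes.map f := by
  intro pipes
  induction pipes with
  | nil => simp
  | cons p t ih =>
    intro acc hlen
    have hp := hlen p (by simp)
    rcases p with _ | ⟨a, _ | ⟨b, _ | ⟨c, _ | ⟨e, r⟩⟩⟩⟩ <;> simp at hp
    simp only [List.foldl_cons, List.map_cons]
    rw [ih _ (fun q hq => hlen q (by simp [hq])), hf]
    simp
lemma pvWellEdges (n : Int) (wells : List Int) (hn : 0 ≤ n) (hw : n ≤ (wells.length : Int)) :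
    (PySem.List.pyRange 1 (n + 1) 1).map
      (fun i => (PySem.List.pyGetD wells (i - 1) 0, (0 : Int), i))
    = (PySem.List.enumerate (PySem.List.slice wells none (some n)) 0).map
      (fun p => (p.2, (0 : Int), p.1 + 1)) := by
  rw [PySem.List.slice_to wells hn, PySem.List.enumerate_eq_map_pyRange (d := 0)]
  have hlt : PySem.List.len (List.take n.toNat wells) = (n : Int) := by
    simp; omega
  have hlt' : (wells.take n.toNat).length = n.toNat := by
    simp; omega
  rw [hlt, PySem.List.pyRange_one, PySem.List.pyRange_one]
  simp only [List.map_map]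
  have h1 : ((n : Int) + 1 - 1).toNat = n.toNat := by omega
  have h0 : ((n : Int) - 0).toNat = n.toNat := by omega
  rw [h1, h0]
  refine List.map_congr_left ?_
  intro k hk
  rw [List.mem_range] at hk
  simp only [Function.comp]
  have e1 : (1 : Int) + (k : Int) - 1 = (k : Int) := by ring
  rw [e1]
  have e2 : (0 : Int) + (k : Int) = (k : Int) := by ring
  rw [e2, PySem.List.pyGetD_natCast, PySem.List.pyGetD_natCast]
  have hk' : k < n.toNat := hk
  have hkw : k < wells.length := by omega
  rw [List.getD_eq_getElem _ _ hkw,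
      List.getD_eq_getElem _ _ (by rw [hlt']; exact hk'), List.getElem_take]
  simp [add_comm]

lemma pvEdges_eq (n : Int) (wells : List Int) (pipes : List (List Int))
    (hn : 0 ≤ n) (hw : n ≤ (wells.length : Int))
    (hp : ∀ p ∈ pipes, p.length = 3 ∧ 0 ≤ p.getD 0 0 ∧ p.getD 0 0 ≤ n ∧
          0 ≤ p.getD 1 0 ∧ p.getD 1 0 ≤ n) :
    pipes.foldl (fun acc p =>
      match p with
      | [c1, c2, c] => acc ++ [(c, c1, c2)]
      | _ => acc)
      ((PySem.List.pyRange 1 (n + 1) 1).map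
        (fun i => (PySem.List.pyGetD wells (i - 1) 0, (0 : Int), i)))
    = (PySem.List.enumerate (PySem.List.slice wells none (some n)) 0).map
        (fun p => (p.2, (0 : Int), p.1 + 1))
      ++ pipes.map (fun p => (p.getD 2 0, p.getD 0 0, p.getD 1 0)) := by
  rw [pvFoldPipes (fun p => (p.getD 2 0, p.getD 0 0, p.getD 1 0)) (fun _ _ _ => rfl) pipes _
      (fun p hpm => (hp p hpm).1),
      pvWellEdges n wells hn hw]

lemma pvEdges_valid (n : Int) (wells : List Int) (pipes : List (List Int))
    (hn : 0 ≤ n)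
    (hp : ∀ p ∈ pipes, p.length = 3 ∧ 0 ≤ p.getD 0 0 ∧ p.getD 0 0 ≤ n ∧
          0 ≤ p.getD 1 0 ∧ p.getD 1 0 ≤ n) :
    ∀ e ∈ PySem.List.sorted
        ((PySem.List.enumerate (PySem.List.slice wells none (some n)) 0).map
          (fun p => (p.2, (0 : Int), p.1 + 1))
        ++ pipes.map (fun p => (p.getD 2 0, p.getD 0 0, p.getD 1 0)))
        (fun t => (t.1 * 8589934592 + t.2.1) * 8589934592 + t.2.2) false,
      0 ≤ e.2.1 ∧ e.2.1.toNat < (n + 1).toNat ∧ 0 ≤ e.2.2 ∧ e.2.2.toNat < (n + 1).toNat := by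
  intro e he
  rw [PySem.List.mem_sorted, List.mem_append] at he
  rcases he with he | he
  · rw [List.mem_map] at he
    obtain ⟨p, hpmem, rfl⟩ := he
    rw [PySem.List.mem_enumerate_iff] at hpmem
    obtain ⟨k, hkl, rfl⟩ := hpmem
    have hsl : (PySem.List.slice wells none (some n)).length ≤ n.toNat := by
      rw [PySem.List.slice_to wells hn]
      simp
    refine ⟨?_, ?_, ?_, ?_⟩ <;> simp <;> omega
  · rw [List.mem_map] at he
    obtain ⟨p, hpmem, rfl⟩ := he
    obtain ⟨hlen, h0, h1, h2, h3⟩ := hp p hpmem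
    refine ⟨?_, ?_, ?_, ?_⟩ <;> dsimp only <;> omega

lemma pvSlice_neg_empty (n : Int) (wells : List Int) (hn : n < 0)
    (hwl : (wells.length : Int) ≤ -n) :
    PySem.List.slice wells none (some n) = [] := by
  have hk : 0 < (-n).toNat := by omega
  have : n = -(((-n).toNat : Nat) : Int) := by omega
  rw [this, PySem.List.slice_to_neg_natCast wells ((-n).toNat) hk]
  have : wells.length - (-n).toNat = 0 := by omega
  rw [this, List.take_zero]

-- ===== VERDICT (by name: the statement is the Claim_ definition above) =====
theorem minCostToSupplyWater_spec : Claim_equal_minCostToSupplyWater := by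
  intro n wells pipes _hdom hpre
  rcases hpre with ⟨hn, hw, hp⟩ | ⟨hn, hpipes, hwl⟩
  · unfold Spec_minCostToSupplyWater minCostToSupplyWater minCostToSupplyWater_alt
    dsimp only
    rw [pvEdges_eq n wells pipes hn hw hp]
    refine pvFold_spec _ _ _ 0 ?_ ?_
    · exact pvInit_inv n
    · intro e he
      have := pvEdges_valid n wells pipes hn hp e he
      simpa [List.length_replicate] using this
  · subst hpipes
    unfold Spec_minCostToSupplyWater minCostToSupplyWater minCostToSupplyWater_alt
    dsimp only
    rw [PySem.List.pyRange_one_eq_nil (by omega), pvSlice_neg_empty n wells hn hwl]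
    rfl
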